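-- pv_equiv track=rewrite | github.com/Kinrokin/KT | KT_PROD_CLEANROOM/tools/verification/generate_audit_eval_report.py | _decision_from_components
-- ===== SOURCE A (Python) =====
-- from typing import Any, Dict, Iterable, List, Optional, Sequence, Set, Tuple
--
-- def _decision_from_components(rows: Sequence[Dict[str, Any]]) -> str:
--     """
--     Conservative composition:
--       - any QUARANTINE or hard_gate_pass=False => QUARANTINE
--       - else any HOLD => HOLD
--       - else PROMOTE
--     """
--     any_hold = False
--     for r in rows:
--         dec = str(r.get("decision", "")).strip().upper()
--         if not bool(r.get("hard_gate_pass", True)):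
--             return "QUARANTINE"
--         if dec == "QUARANTINE":
--             return "QUARANTINE"
--         if dec == "HOLD":
--             any_hold = True
--     return "HOLD" if any_hold else "PROMOTE"
-- ===== SOURCE B (Python) =====
-- from typing import Any, Dict, Sequence
--
-- def _decision_from_components(rows: Sequence[Dict[str, Any]]) -> str:
--     if any(not bool(r.get("hard_gate_pass", True))
--            or str(r.get("decision", "")).strip().upper() == "QUARANTINE"
--            for r in rows):
--         return "QUARANTINE"
--     if any(str(r.get("decision", "")).strip().upper() == "HOLD" for r in rows):
--         return "HOLD"
--     return "PROMOTE"
-- ===== Notes on version B (the rewrite author's own statement) =====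
-- stated objective: idiomatic
-- what changed: Replaced the single stateful loop with an any_hold flag and early returns by two short-circuiting any() passes: one for the QUARANTINE conditions, then one for HOLD.
import Mathlib
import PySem

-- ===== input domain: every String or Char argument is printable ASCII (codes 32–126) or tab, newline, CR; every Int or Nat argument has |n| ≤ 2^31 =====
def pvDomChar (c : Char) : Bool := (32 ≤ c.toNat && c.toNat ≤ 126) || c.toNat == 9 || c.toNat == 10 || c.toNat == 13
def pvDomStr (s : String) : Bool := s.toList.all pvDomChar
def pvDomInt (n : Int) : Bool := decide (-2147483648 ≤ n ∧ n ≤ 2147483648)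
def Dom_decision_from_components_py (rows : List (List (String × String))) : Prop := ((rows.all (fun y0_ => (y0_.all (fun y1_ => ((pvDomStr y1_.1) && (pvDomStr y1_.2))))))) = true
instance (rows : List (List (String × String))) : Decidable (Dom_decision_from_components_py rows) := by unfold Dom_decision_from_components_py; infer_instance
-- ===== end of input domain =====

-- B replaces A's single early-return loop with two short-circuiting any() passes (idiomatic decomposition, same cost).

-- shared row subexpressions, literal transcriptions of the Python expressions both programs contain:
-- str(r.get("decision", "")).strip().upper()
def pvRowDec (r : List (String × String)) : String :=
  PySem.Str.upper (PySem.Str.strip ((PySem.Dict.mk r).getD "decision" ""))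
-- bool(r.get("hard_gate_pass", True))  (values here are strings: truthy = nonempty)
def pvRowHard (r : List (String × String)) : Bool :=
  match (PySem.Dict.mk r).get? "hard_gate_pass" with
  | none => true
  | some s => s ≠ ""

-- ===== PORT A =====
def decision_from_components_py_loop : List (List (String × String)) → Bool → String
  | [], any_hold => if any_hold then "HOLD" else "PROMOTE"
  | r :: rs, any_hold =>
    let dec := pvRowDec r
    if !(pvRowHard r) then "QUARANTINE"
    else if dec = "QUARANTINE" then "QUARANTINE"
    else decision_from_components_py_loop rs (if dec = "HOLD" then true else any_hold)

def decision_from_components_py (rows : List (List (String × String))) : String :=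
  decision_from_components_py_loop rows false

-- ===== PORT B =====
def decision_from_components_py_alt (rows : List (List (String × String))) : String :=
  if rows.any (fun r => !(pvRowHard r) || pvRowDec r == "QUARANTINE") then "QUARANTINE"
  else if rows.any (fun r => pvRowDec r == "HOLD") then "HOLD"
  else "PROMOTE"

-- ===== PRECONDITION & SPEC =====
def Spec_decision_from_components_py (rows : List (List (String × String))) (out : String) : Prop := out = decision_from_components_py_alt rows
instance (rows : List (List (String × String))) (out : String) : Decidable (Spec_decision_from_components_py rows out) := by unfold Spec_decision_from_components_py; infer_instance

-- ===== CLAIM (what is proved, stated in full; the proofs are below) =====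
def Claim_equal_decision_from_components_py : Prop := ∀ (rows : List (List (String × String))), Dom_decision_from_components_py rows → Spec_decision_from_components_py rows (decision_from_components_py rows)

-- ===== LEMMAS AND PROOFS =====
theorem pv_loop_eq (rows : List (List (String × String))) :
    ∀ ah, decision_from_components_py_loop rows ah =
      (if rows.any (fun r => !(pvRowHard r) || pvRowDec r == "QUARANTINE") then "QUARANTINE"
       else if ah || rows.any (fun r => pvRowDec r == "HOLD") then "HOLD"
       else "PROMOTE") := by
  induction rows with
  | nil => intro ah; simp [decision_from_components_py_loop]
  | cons r rs ih =>
    intro ah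
    simp only [decision_from_components_py_loop, List.any_cons]
    by_cases hh : pvRowHard r
    · by_cases hq : pvRowDec r = "QUARANTINE"
      · simp [hh, hq]
      · by_cases hd : pvRowDec r = "HOLD"
        · simp [hh, hd, ih]
        · simp [hh, hq, hd, ih]
    · simp [hh]

-- ===== VERDICT (by name: the statement is the Claim_ definition above) =====
theorem decision_from_components_py_spec : Claim_equal_decision_from_components_py := by
  intro rows _
  unfold Spec_decision_from_components_py decision_from_components_py decision_from_components_py_alt
  simp [pv_loop_eq]
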